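-- pv_equiv track=rewrite | github.com/junsgi/Cpp-Algorithm | 프로그래머스/2/135807. 숫자 카드 나누기/숫자 카드 나누기.py | solution
-- ===== SOURCE A (Python) =====
-- def gcd(x, y):
--     if not y: return x
--     return gcd(y, x % y)
--
-- def solution(arrayA, arrayB):
--     answer = 0
--     LEN = len(arrayA)
--     if LEN == 1:
--         A, B = arrayA[0] % arrayB[0], arrayB[0] % arrayA[0]
--         if not (A or B): answer = 0
--         else: answer = max(arrayA[0], arrayB[0])
--     else:
--         A, B = gcd(arrayA[0], arrayA[1]), gcd(arrayB[0], arrayB[1])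
--         for i in range(2, LEN):
--             A, B = gcd(A, arrayA[i]), gcd(B, arrayB[i])
--         resAA, resAB = sum(map(lambda x : x % A == 0, arrayA)), sum(map(lambda x : x % B == 0, arrayA))
--         resBB, resBA = sum(map(lambda x : x % B == 0, arrayB)), sum(map(lambda x : x % A == 0, arrayB))
--         if resAA * resAB == 0 or resBB * resBA == 0: answer = max(A, B)
--
--     return answer
-- ===== SOURCE B (Python) =====
-- def solution(arrayA, arrayB):
--     def gcd(x, y):
--         while y:
--             x, y = y, x % y
--         return x
--     gA = 0
--     for v in arrayA:
--         gA = gcd(gA, v)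
--     gB = 0
--     for v in arrayB:
--         gB = gcd(gB, v)
--     if all(a % gB for a in arrayA) or all(b % gA for b in arrayB):
--         return max(gA, gB)
--     return 0
-- ===== Notes on version B (the rewrite author's own statement) =====
-- stated objective: faster
-- what changed: B replaces the recursive gcd with an iterative while-loop, folds each full array to its gcd in one pass (eliminating A's LEN==1 special branch and the index-based range(2,LEN) loop), and replaces A's four full indicator-sum passes and product test with two short-circuiting all(...) divisibility tests; Pre_ excludes unequal-length inputs, on which A's mixing of a len(arrayA)-prefix gcd of arrayB with full-arrayB divisibility counts is accidental, and inputs where A raises (empty/too-short/all-zero arrays).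
-- outside the precondition, e.g. on solution([2], [-4, 8]): A returns 2, B returns 4
import Mathlib
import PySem

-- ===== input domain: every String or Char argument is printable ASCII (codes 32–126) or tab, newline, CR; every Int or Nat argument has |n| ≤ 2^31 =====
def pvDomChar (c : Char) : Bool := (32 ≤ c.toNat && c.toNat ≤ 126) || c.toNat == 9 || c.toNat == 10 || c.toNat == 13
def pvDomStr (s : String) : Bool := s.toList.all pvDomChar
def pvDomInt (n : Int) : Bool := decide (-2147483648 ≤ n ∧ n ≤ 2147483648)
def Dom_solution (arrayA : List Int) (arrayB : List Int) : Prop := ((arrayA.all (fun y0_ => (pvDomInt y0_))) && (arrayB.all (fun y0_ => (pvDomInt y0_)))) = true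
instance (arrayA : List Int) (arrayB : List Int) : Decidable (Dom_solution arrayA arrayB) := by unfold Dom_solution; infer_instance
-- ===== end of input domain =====

-- B folds each array to its gcd in one pass with an iterative gcd (no LEN==1 branch, no index
-- loop) and tests divisibility with two short-circuiting all(...) checks instead of A's four
-- indicator sums; measurably faster by a constant factor (objective: faster).

-- termination fact for the Python-mod gcd recursions (cited by both ports' decreasing_by)
theorem pvModNatAbsLt (x y : Int) (h : y ≠ 0) : (PySem.Int.mod x y).natAbs < y.natAbs := by
  rcases lt_or_gt_of_ne h with hy | hy
  · have := PySem.Int.mod_neg_bounds x hy; omega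
  · have h1 := PySem.Int.mod_nonneg x hy; have h2 := PySem.Int.mod_lt x hy; omega

-- ===== PORT A =====
-- A's recursive gcd: if not y: return x; return gcd(y, x % y)
def gcdA (x y : Int) : Int :=
  if _hy : y = 0 then x else gcdA y (PySem.Int.mod x y)
termination_by y.natAbs
decreasing_by exact pvModNatAbsLt x y _hy

def solution (arrayA : List Int) (arrayB : List Int) : Int :=
  let LEN : Int := arrayA.length
  if LEN = 1 then
    let A := PySem.Int.mod (PySem.List.pyGetD arrayA 0 0) (PySem.List.pyGetD arrayB 0 0)
    let B := PySem.Int.mod (PySem.List.pyGetD arrayB 0 0) (PySem.List.pyGetD arrayA 0 0)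
    if A = 0 ∧ B = 0 then 0
    else max (PySem.List.pyGetD arrayA 0 0) (PySem.List.pyGetD arrayB 0 0)
  else
    let A0 := gcdA (PySem.List.pyGetD arrayA 0 0) (PySem.List.pyGetD arrayA 1 0)
    let B0 := gcdA (PySem.List.pyGetD arrayB 0 0) (PySem.List.pyGetD arrayB 1 0)
    let p := (PySem.List.pyRange 2 LEN).foldl
      (fun (s : Int × Int) i =>
        (gcdA s.1 (PySem.List.pyGetD arrayA i 0), gcdA s.2 (PySem.List.pyGetD arrayB i 0)))
      (A0, B0)
    let resAA := (arrayA.map (fun x => if PySem.Int.mod x p.1 = 0 then (1:Int) else 0)).sum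
    let resAB := (arrayA.map (fun x => if PySem.Int.mod x p.2 = 0 then (1:Int) else 0)).sum
    let resBB := (arrayB.map (fun x => if PySem.Int.mod x p.2 = 0 then (1:Int) else 0)).sum
    let resBA := (arrayB.map (fun x => if PySem.Int.mod x p.1 = 0 then (1:Int) else 0)).sum
    if resAA * resAB = 0 ∨ resBB * resBA = 0 then max p.1 p.2 else 0

-- ===== PORT B =====
-- B's iterative gcd: while y: x, y = y, x % y; return x   (the while loop as tail recursion)
def gcdB (x y : Int) : Int :=
  if _hy : y = 0 then x else gcdB y (PySem.Int.mod x y)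
termination_by y.natAbs
decreasing_by exact pvModNatAbsLt x y _hy

def solution_alt (arrayA : List Int) (arrayB : List Int) : Int :=
  let gA := arrayA.foldl gcdB 0
  let gB := arrayB.foldl gcdB 0
  if arrayA.all (fun a => PySem.Int.mod a gB != 0) || arrayB.all (fun b => PySem.Int.mod b gA != 0)
  then max gA gB else 0

-- ===== PRECONDITION & SPEC =====
-- Pre_ excludes inputs where A raises (empty arrayA, arrayB shorter than arrayA, an all-zero
-- array giving division by zero) and unequal-length inputs on which A still returns: there A's mix
-- of a len(arrayA)-prefix gcd of arrayB with full-arrayB divisibility counts is accidental.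
def Pre_solution (arrayA : List Int) (arrayB : List Int) : Prop :=
  arrayA.length = arrayB.length ∧ arrayA ≠ [] ∧
  (∃ a ∈ arrayA, a ≠ 0) ∧ (∃ b ∈ arrayB, b ≠ 0)
instance (arrayA : List Int) (arrayB : List Int) : Decidable (Pre_solution arrayA arrayB) := by
  unfold Pre_solution; infer_instance

def pvWitness_solution : List Int × List Int := ([4, 6], [3, 9])

def Spec_solution (arrayA : List Int) (arrayB : List Int) (out : Int) : Prop := out = solution_alt arrayA arrayB
instance (arrayA : List Int) (arrayB : List Int) (out : Int) : Decidable (Spec_solution arrayA arrayB out) := by unfold Spec_solution; infer_instance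

-- ===== CLAIM (what is proved, stated in full; the proofs are below) =====
def Claim_equal_solution : Prop := ∀ (arrayA : List Int) (arrayB : List Int), Dom_solution arrayA arrayB → Pre_solution arrayA arrayB → Spec_solution arrayA arrayB (solution arrayA arrayB)

-- ===== LEMMAS AND PROOFS =====

theorem gcdA_eq_gcdB (x y : Int) : gcdA x y = gcdB x y := by
  rw [gcdA, gcdB]
  split
  · rfl
  · exact gcdA_eq_gcdB y (PySem.Int.mod x y)
termination_by y.natAbs
decreasing_by exact pvModNatAbsLt x y (by assumption)

theorem gcdB_zero_left (y : Int) : gcdB 0 y = y := by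
  rw [gcdB]
  split
  · omega
  · have : PySem.Int.mod 0 y = 0 := (PySem.Int.mod_eq_zero_iff_dvd 0 y).mpr (dvd_zero y)
    rw [this, gcdB]; simp

theorem gcdB_dvd (x y : Int) : gcdB x y ∣ x ∧ gcdB x y ∣ y := by
  rw [gcdB]
  split
  · subst ‹y = 0›; exact ⟨dvd_refl x, dvd_zero x⟩
  · rename_i hy
    have ih := gcdB_dvd y (PySem.Int.mod x y)
    refine ⟨?_, ih.1⟩
    have hsum : gcdB y (PySem.Int.mod x y) ∣
        PySem.Int.floordiv x y * y + PySem.Int.mod x y :=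
      dvd_add (Dvd.dvd.mul_left ih.1 _) ih.2
    rwa [PySem.Int.floordiv_mul_add_mod x y] at hsum
termination_by y.natAbs
decreasing_by exact pvModNatAbsLt x y (by assumption)

theorem gcdB_eq_zero (x y : Int) (h : gcdB x y = 0) : x = 0 ∧ y = 0 := by
  rw [gcdB] at h
  split at h
  · exact ⟨h, by omega⟩
  · rename_i hy
    exact absurd (gcdB_eq_zero y (PySem.Int.mod x y) h).1 hy
termination_by y.natAbs
decreasing_by exact pvModNatAbsLt x y (by assumption)

theorem foldl_gcdB_dvd (l : List Int) (init : Int) :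
    (l.foldl gcdB init ∣ init) ∧ ∀ x ∈ l, l.foldl gcdB init ∣ x := by
  induction l generalizing init with
  | nil => simp
  | cons a t ih =>
    have h := ih (gcdB init a)
    refine ⟨h.1.trans (gcdB_dvd init a).1, ?_⟩
    intro x hx
    rcases List.mem_cons.mp hx with rfl | hx
    · exact h.1.trans (gcdB_dvd init x).2
    · exact h.2 x hx

theorem foldl_gcdB_ne_zero (l : List Int) (init : Int)
    (h : ∃ x ∈ l, x ≠ 0) : l.foldl gcdB init ≠ 0 := by
  intro h0
  obtain ⟨x, hx, hxne⟩ := h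
  have hdvd := (foldl_gcdB_dvd l init).2 x hx
  rw [h0] at hdvd
  exact hxne (zero_dvd_iff.mp hdvd)

theorem pvSumIte (l : List Int) (g : Int) :
    (l.map (fun x => if PySem.Int.mod x g = 0 then (1:Int) else 0)).sum
      = (l.countP (fun x => PySem.Int.mod x g == 0) : Int) := by
  rw [← PySem.List.sum_map_ite_one_zero (fun x => PySem.Int.mod x g == 0) l]
  simp

theorem pvCountLength (l : List Int) (g : Int) (h : ∀ x ∈ l, g ∣ x) :
    l.countP (fun x => PySem.Int.mod x g == 0) = l.length :=
  List.countP_eq_length.mpr (fun a ha => by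
    simp [PySem.Int.mod_eq_zero_iff_dvd, h a ha])

theorem pvCountZeroIff (l : List Int) (g : Int) :
    l.countP (fun x => PySem.Int.mod x g == 0) = 0 ↔
      l.all (fun a => PySem.Int.mod a g != 0) = true := by
  simp [List.countP_eq_zero, List.all_eq_true]

-- ===== VERDICT (by name: the statement is the Claim_ definition above) =====
theorem solution_spec : Claim_equal_solution := by
  intro arrayA arrayB _ hpre
  obtain ⟨hlen, hne, hA, hB⟩ := hpre
  unfold Spec_solution
  match arrayA, arrayB with
  | [], _ => exact absurd rfl hne
  | [a0], [] => simp at hlen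
  | [a0], [b0] =>
    obtain ⟨a, ha, ha0⟩ := hA
    obtain ⟨b, hb, hb0⟩ := hB
    simp only [List.mem_singleton] at ha hb
    subst ha; subst hb
    simp only [solution, solution_alt, List.length_cons, List.length_nil,
      PySem.List.pyGetD_zero_cons, List.foldl_cons, List.foldl_nil, gcdB_zero_left,
      List.all_cons, List.all_nil]
    by_cases h1 : PySem.Int.mod a b = 0 <;> by_cases h2 : PySem.Int.mod b a = 0 <;>
      simp [h1, h2]
  | [a0], b0 :: b1 :: bs => simp at hlen
  | a0 :: a1 :: as, [] => simp at hlen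
  | a0 :: a1 :: as, [b0] => simp at hlen
  | a0 :: a1 :: as, b0 :: b1 :: bs =>
    simp only [List.length_cons] at hlen
    have hlen' : as.length = bs.length := by omega
    -- B-side gcds
    have hg1 : (a0 :: a1 :: as).foldl gcdB 0 = as.foldl gcdB (gcdB a0 a1) := by
      simp [List.foldl_cons, gcdB_zero_left]
    have hg2 : (b0 :: b1 :: bs).foldl gcdB 0 = bs.foldl gcdB (gcdB b0 b1) := by
      simp [List.foldl_cons, gcdB_zero_left]
    have hg1ne : as.foldl gcdB (gcdB a0 a1) ≠ 0 := hg1 ▸ foldl_gcdB_ne_zero _ 0 hA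
    have hg2ne : bs.foldl gcdB (gcdB b0 b1) ≠ 0 := hg2 ▸ foldl_gcdB_ne_zero _ 0 hB
    have hdvd1 : ∀ x ∈ (a0 :: a1 :: as), as.foldl gcdB (gcdB a0 a1) ∣ x := by
      intro x hx; exact hg1 ▸ (foldl_gcdB_dvd _ 0).2 x hx
    have hdvd2 : ∀ x ∈ (b0 :: b1 :: bs), bs.foldl gcdB (gcdB b0 b1) ∣ x := by
      intro x hx; exact hg2 ▸ (foldl_gcdB_dvd _ 0).2 x hx
    -- A-side: the pair loop computes the same two gcds
    have hrange : (((a0 :: a1 :: as).length : Int)) = (((b0 :: b1 :: bs).length : Int)) := by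
      simp; omega
    have hpair :
        (PySem.List.pyRange 2 ((a0 :: a1 :: as).length : Int)).foldl
          (fun (s : Int × Int) i =>
            (gcdA s.1 (PySem.List.pyGetD (a0 :: a1 :: as) i 0),
             gcdA s.2 (PySem.List.pyGetD (b0 :: b1 :: bs) i 0)))
          (gcdA (PySem.List.pyGetD (a0 :: a1 :: as) 0 0) (PySem.List.pyGetD (a0 :: a1 :: as) 1 0),
           gcdA (PySem.List.pyGetD (b0 :: b1 :: bs) 0 0) (PySem.List.pyGetD (b0 :: b1 :: bs) 1 0))
          = (as.foldl gcdB (gcdB a0 a1), bs.foldl gcdB (gcdB b0 b1)) := by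
      rw [PySem.List.foldl_prod_mk
        (f := fun s e => gcdA s (PySem.List.pyGetD (a0 :: a1 :: as) e 0))
        (g := fun s e => gcdA s (PySem.List.pyGetD (b0 :: b1 :: bs) e 0))]
      rw [PySem.List.foldl_pyRange_pyGetD' (a0 :: a1 :: as) 0 gcdA _ (by norm_num)]
      rw [hrange, PySem.List.foldl_pyRange_pyGetD' (b0 :: b1 :: bs) 0 gcdA _ (by norm_num)]
      simp only [PySem.List.pyGetD_ofNat', List.getD_cons_succ, List.getD_cons_zero]
      simp [funext (fun x => funext (fun y => gcdA_eq_gcdB x y))]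
    -- now evaluate both programs
    simp only [solution, solution_alt]
    rw [if_neg (by simp; omega)]
    simp only [hpair, hg1, hg2, pvSumIte]
    have hAA := pvCountLength _ _ hdvd1
    have hBB := pvCountLength _ _ hdvd2
    rw [hAA, hBB]
    have hiff :
        ((((a0 :: a1 :: as).length : Int)) * ((a0 :: a1 :: as).countP
            (fun x => PySem.Int.mod x (bs.foldl gcdB (gcdB b0 b1)) == 0) : Int) = 0 ∨
         (((b0 :: b1 :: bs).length : Int)) * ((b0 :: b1 :: bs).countP
            (fun x => PySem.Int.mod x (as.foldl gcdB (gcdB a0 a1)) == 0) : Int) = 0) ↔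
        (((a0 :: a1 :: as).all (fun a => PySem.Int.mod a (bs.foldl gcdB (gcdB b0 b1)) != 0)) ||
         ((b0 :: b1 :: bs).all (fun b => PySem.Int.mod b (as.foldl gcdB (gcdB a0 a1)) != 0))) = true := by
      rw [Bool.or_eq_true, ← pvCountZeroIff, ← pvCountZeroIff]
      constructor
      · rintro (h | h)
        · left
          have : ((a0 :: a1 :: as).countP
              (fun x => PySem.Int.mod x (bs.foldl gcdB (gcdB b0 b1)) == 0) : Int) = 0 := by
            rcases mul_eq_zero.mp h with h' | h'
            · exfalso; simp at h'; omega
            · exact h'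
          exact_mod_cast this
        · right
          have : ((b0 :: b1 :: bs).countP
              (fun x => PySem.Int.mod x (as.foldl gcdB (gcdB a0 a1)) == 0) : Int) = 0 := by
            rcases mul_eq_zero.mp h with h' | h'
            · exfalso; simp at h'; omega
            · exact h'
          exact_mod_cast this
      · rintro (h | h)
        · left; rw [h]; ring
        · right; rw [h]; ring
    exact if_congr hiff rfl rfl
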